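-- pv_equiv track=rewrite | github.com/jesterKing/SpindumpTo3dmFlameGraph | flamegraph.py | take_until_empty_line
-- ===== SOURCE A (Python) =====
-- def take_until_empty_line(lines):
--     """Returns first_lines and rest_lines."""
--     assert len(lines) > 0
--     assert len(lines[0]) > 0, "Empty line should be consumed earlier"
--     empty_line_index = 1
--     while empty_line_index < len(lines):
--         if len(lines[empty_line_index]) == 0:
--             break
--         empty_line_index += 1
--     nonempty_line_index = empty_line_index + 1
--     while nonempty_line_index < len(lines):
--         if len(lines[nonempty_line_index]) > 0:
--             break
--         nonempty_line_index += 1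
--     first_lines = lines[:empty_line_index]
--     rest_lines = lines[nonempty_line_index:] if (nonempty_line_index < len(lines)) else None
--     return first_lines, rest_lines
-- ===== SOURCE B (Python) =====
-- def take_until_empty_line(lines):
--     """Returns first_lines and rest_lines."""
--     assert len(lines) > 0
--     assert len(lines[0]) > 0, "Empty line should be consumed earlier"
--     first = []
--     it = enumerate(lines)
--     for _, line in it:
--         if not line:
--             break
--         first.append(line)
--     else:
--         return first, None  # no empty line at all
--     for j, line in it:
--         if line:
--             return first, lines[j:]
--     return first, None
-- ===== Notes on version B (the rewrite author's own statement) =====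
-- stated objective: faster
-- what changed: Replaces A's two index-based while loops plus prefix slicing by a single shared iterator consumed by two for loops (with for/else): the first accumulates the non-empty prefix by appending, the second returns the suffix at the first non-empty line after the break; iterating directly instead of per-step indexing and len() calls gives a constant-factor speedup.
import Mathlib
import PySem

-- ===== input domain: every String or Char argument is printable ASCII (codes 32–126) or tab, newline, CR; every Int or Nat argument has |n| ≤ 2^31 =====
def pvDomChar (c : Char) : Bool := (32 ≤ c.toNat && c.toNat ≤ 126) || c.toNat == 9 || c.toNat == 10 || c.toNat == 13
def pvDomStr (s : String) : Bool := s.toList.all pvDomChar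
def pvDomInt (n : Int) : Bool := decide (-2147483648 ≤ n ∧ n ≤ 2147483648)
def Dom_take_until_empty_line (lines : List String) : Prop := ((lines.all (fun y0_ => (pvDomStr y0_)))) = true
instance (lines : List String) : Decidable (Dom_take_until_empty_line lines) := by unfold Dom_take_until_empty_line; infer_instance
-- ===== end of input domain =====

-- B replaces A's two index-based while loops + slicing by structural recursion on the
-- list (peel the non-empty prefix, then skip the empty run); same return value on Pre_.

-- ===== PORT A =====
-- first while loop: advance i while lines[i] is non-empty
def aEmptyLoop (lines : List String) (i : Nat) : Nat :=
  if h : i < lines.length then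
    if PySem.Str.len lines[i] == 0 then i else aEmptyLoop lines (i + 1)
  else i
termination_by lines.length - i

-- second while loop: advance i while lines[i] is empty
def aNonemptyLoop (lines : List String) (i : Nat) : Nat :=
  if h : i < lines.length then
    if 0 < PySem.Str.len lines[i] then i else aNonemptyLoop lines (i + 1)
  else i
termination_by lines.length - i

def take_until_empty_line (lines : List String) : List String × Option (List String) :=
  -- the two asserts raise exactly outside Pre_take_until_empty_line
  let empty_line_index := aEmptyLoop lines 1
  let nonempty_line_index := aNonemptyLoop lines (empty_line_index + 1)
  -- lines[:e] and lines[n:] with non-negative indices are exactly take / drop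
  (lines.take empty_line_index,
   if nonempty_line_index < lines.length then some (lines.drop nonempty_line_index) else none)

-- ===== PORT B =====
-- second for loop over the remaining iterator: return the suffix at the first
-- non-empty line (lines[j:] IS that suffix), else None
def bSecondLoop (xs : List String) : Option (List String) :=
  match xs with
  | [] => none
  | x :: rest => if 0 < PySem.Str.len x then some (x :: rest) else bSecondLoop rest

-- first for loop: append non-empty lines to `first` (accumulator, Python list append),
-- break at the first empty line into the second loop; for/else when never broken
def bFirstLoop (xs : List String) (first : List String) : List String × Option (List String) :=
  match xs with
  | [] => (first.reverse, none)
  | x :: rest =>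
    if PySem.Str.len x == 0 then (first.reverse, bSecondLoop rest)
    else bFirstLoop rest (x :: first)

def take_until_empty_line_alt (lines : List String) : List String × Option (List String) :=
  -- the two asserts raise exactly outside Pre_take_until_empty_line
  bFirstLoop lines []

-- ===== PRECONDITION & SPEC =====
-- Pre_ excludes exactly the inputs on which A's two asserts raise AssertionError:
-- the empty list and a list whose first line is empty.
def Pre_take_until_empty_line (lines : List String) : Prop :=
  lines ≠ [] ∧ 0 < PySem.Str.len (lines.headD "")
instance (lines : List String) : Decidable (Pre_take_until_empty_line lines) := by
  unfold Pre_take_until_empty_line; infer_instance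

def pvWitness_take_until_empty_line : List String := ["a", "b", "", "c"]

def Spec_take_until_empty_line (lines : List String) (out : List String × Option (List String)) : Prop := out = take_until_empty_line_alt lines
instance (lines : List String) (out : List String × Option (List String)) : Decidable (Spec_take_until_empty_line lines out) := by unfold Spec_take_until_empty_line; infer_instance

-- ===== CLAIM (what is proved, stated in full; the proofs are below) =====
def Claim_equal_take_until_empty_line : Prop := ∀ (lines : List String), Dom_take_until_empty_line lines → Pre_take_until_empty_line lines → Spec_take_until_empty_line lines (take_until_empty_line lines)

-- ===== LEMMAS AND PROOFS =====

lemma aEmptyLoop_eq (l : List String) (i : Nat) :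
    aEmptyLoop l i = i + List.findIdx (fun s => PySem.Str.len s == 0) (l.drop i) := by
  fun_induction aEmptyLoop l i with
  | case1 i h hp =>
    rw [List.drop_eq_getElem_cons h]
    simp only [List.findIdx_cons, hp, cond_true, Nat.add_zero]
  | case2 i h hp ih =>
    rw [List.drop_eq_getElem_cons h, ih]
    simp only [List.findIdx_cons, hp, cond_false]
    omega
  | case3 i h =>
    rw [List.drop_eq_nil_of_le (by omega), List.findIdx_nil]
    omega

lemma aNonemptyLoop_eq (l : List String) (i : Nat) :
    aNonemptyLoop l i = i + List.findIdx (fun s => decide (0 < PySem.Str.len s)) (l.drop i) := by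
  fun_induction aNonemptyLoop l i with
  | case1 i h hp =>
    rw [List.drop_eq_getElem_cons h]
    simp only [List.findIdx_cons, decide_eq_true hp, cond_true, Nat.add_zero]
  | case2 i h hp ih =>
    rw [List.drop_eq_getElem_cons h, ih]
    simp only [List.findIdx_cons, decide_eq_false hp, cond_false]
    omega
  | case3 i h =>
    rw [List.drop_eq_nil_of_le (by omega), List.findIdx_nil]
    omega

lemma bSecondLoop_eq (xs : List String) :
    bSecondLoop xs =
      if List.findIdx (fun s => decide (0 < PySem.Str.len s)) xs < xs.length then
        some (xs.drop (List.findIdx (fun s => decide (0 < PySem.Str.len s)) xs))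
      else none := by
  induction xs with
  | nil => rfl
  | cons x r ih =>
    by_cases hp : 0 < PySem.Str.len x
    · simp only [bSecondLoop]
      rw [if_pos hp]
      simp only [List.findIdx_cons, decide_eq_true hp, cond_true, List.length_cons,
        List.drop_zero]
      rw [if_pos (Nat.succ_pos _)]
    · simp only [bSecondLoop]
      rw [if_neg hp]
      simp only [ih, List.findIdx_cons, decide_eq_false hp, cond_false, List.length_cons,
        List.drop_succ_cons]
      split_ifs with h1 h2 h2 <;> first | rfl | omega

lemma bFirstLoop_eq (xs acc : List String) :
    bFirstLoop xs acc =
      (acc.reverse ++ xs.take (List.findIdx (fun s => PySem.Str.len s == 0) xs),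
       if List.findIdx (fun s => PySem.Str.len s == 0) xs < xs.length then
         bSecondLoop (xs.drop (List.findIdx (fun s => PySem.Str.len s == 0) xs + 1))
       else none) := by
  induction xs generalizing acc with
  | nil => simp [bFirstLoop]
  | cons x r ih =>
    by_cases hp : (PySem.Str.len x == 0) = true
    · simp only [bFirstLoop]
      rw [if_pos hp]
      simp only [List.findIdx_cons, hp, cond_true, List.take_zero, List.append_nil,
        List.length_cons, Nat.zero_add, List.drop_one, List.tail_cons]
      rw [if_pos (Nat.succ_pos _)]
    · have hpf : (PySem.Str.len x == 0) = false := eq_false_of_ne_true hp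
      simp only [bFirstLoop]
      rw [if_neg hp]
      simp only [ih, List.findIdx_cons, hpf, cond_false, List.take_succ_cons,
        List.reverse_cons, List.append_assoc, List.cons_append, List.nil_append,
        List.length_cons, List.drop_succ_cons]
      split_ifs with h1 h2 h2 <;> first | rfl | omega

-- ===== VERDICT (by name: the statement is the Claim_ definition above) =====
theorem take_until_empty_line_spec : Claim_equal_take_until_empty_line := by
  intro lines _ hpre
  obtain ⟨hne, hhead⟩ := hpre
  obtain ⟨x, r, rfl⟩ : ∃ x r, lines = x :: r := by
    cases lines with
    | nil => exact absurd rfl hne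
    | cons x r => exact ⟨x, r, rfl⟩
  rw [List.headD_cons] at hhead
  have hpx : ((fun s => PySem.Str.len s == 0) x) = false := by
    simp only [beq_eq_false_iff_ne, ne_eq]; omega
  show take_until_empty_line (x :: r) = take_until_empty_line_alt (x :: r)
  set pE : String → Bool := fun s => PySem.Str.len s == 0 with hpE
  set pN : String → Bool := fun s => decide (0 < PySem.Str.len s) with hpN
  have hE : List.findIdx pE (x :: r) = List.findIdx pE r + 1 := by
    rw [List.findIdx_cons, hpx, cond_false]
  set E := List.findIdx pE (x :: r) with hEdef
  have hEle : E ≤ r.length + 1 := by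
    have := List.findIdx_le_length (p := pE) (xs := x :: r)
    simpa using this
  have he : aEmptyLoop (x :: r) 1 = E := by
    rw [aEmptyLoop_eq, ← hpE, List.drop_one, List.tail_cons, hE, Nat.add_comm]
  have hn : aNonemptyLoop (x :: r) (E + 1)
      = E + 1 + List.findIdx pN ((x :: r).drop (E + 1)) := by
    rw [aNonemptyLoop_eq, ← hpN]
  have hg := List.findIdx_le_length (p := pN) (xs := (x :: r).drop (E + 1))
  rw [List.length_drop] at hg
  unfold take_until_empty_line take_until_empty_line_alt
  dsimp only
  rw [bFirstLoop_eq, List.reverse_nil, List.nil_append, ← hpE, ← hEdef]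
  apply Prod.ext
  · rw [he]
  · rw [he, hn, bSecondLoop_eq, ← hpN]
    set g := List.findIdx pN ((x :: r).drop (E + 1)) with hgdef
    rw [List.drop_drop, List.length_drop]
    simp only [List.length_cons] at *
    split_ifs with h1 h2 h2 <;> first
      | rfl
      | omega
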